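-- pv_equiv track=rewrite | github.com/nickelly/DecisionTree | dtree.py | toCategorical
-- ===== SOURCE A (Python) =====
-- import math
--
-- def toCategorical(data, numClasses):
-- 	length = len(data)
-- 	categoricalData = []
-- 	currentClass = 0
-- 	justCategorical = []
-- 	bucketLength = math.ceil(length/numClasses)
--
-- 	indexData = [(index, item) for index, item in enumerate(data)]
-- 	indexData.sort(key = lambda x: x[1])
--
-- 	for i in range(length):
-- 		categoricalData.append([currentClass, indexData[i][0]])
-- 		if (i + 1) % bucketLength == 0:
-- 			currentClass = currentClass + 1
-- 	categoricalData.sort(key = lambda x: x[1])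
--
-- 	for i in range(length):
-- 		justCategorical.append(categoricalData[i][0])
-- 	return justCategorical
-- ===== SOURCE B (Python) =====
-- import math
--
-- def toCategorical(data, numClasses):
--     length = len(data)
--     if length == 0:
--         return []
--     bucketLength = math.ceil(length / numClasses)
--     classOfRank = []
--     currentClass = 0
--     for r in range(length):
--         classOfRank.append(currentClass)
--         if (r + 1) % bucketLength == 0:
--             currentClass = currentClass + 1
--     result = []
--     for i, x in enumerate(data):
--         rank = 0
--         for j, y in enumerate(data):
--             if y < x or (y == x and j < i):
--                 rank = rank + 1
--         result.append(classOfRank[rank])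
--     return result
-- ===== Notes on version B (the rewrite author's own statement) =====
-- stated objective: alternative
-- what changed: B eliminates both sorts entirely: it computes each element's ordinal rank directly by pairwise comparison counting (count of strictly smaller values, plus equal values at earlier indices, which equals the element's position in A's stable value-sort) and looks the class up in a precomputed class-per-rank table, instead of A's sort/label/re-sort/extract pipeline.
import Mathlib
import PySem

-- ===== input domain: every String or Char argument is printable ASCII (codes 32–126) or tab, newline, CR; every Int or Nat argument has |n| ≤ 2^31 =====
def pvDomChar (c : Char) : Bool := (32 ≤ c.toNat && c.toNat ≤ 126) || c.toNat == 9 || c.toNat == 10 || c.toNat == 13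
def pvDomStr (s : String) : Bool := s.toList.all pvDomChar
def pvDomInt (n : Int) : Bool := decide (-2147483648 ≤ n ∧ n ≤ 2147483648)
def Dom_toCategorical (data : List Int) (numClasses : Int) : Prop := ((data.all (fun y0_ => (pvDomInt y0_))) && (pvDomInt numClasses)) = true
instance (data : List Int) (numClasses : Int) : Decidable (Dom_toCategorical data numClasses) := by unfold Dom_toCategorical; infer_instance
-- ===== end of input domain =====

-- B drops both of A's sorts: it computes each element's ordinal rank by pairwise comparison
-- counting (smaller values, plus equal values at earlier indices — the element's position in A's
-- stable value-sort) and reads the class from a precomputed class-per-rank table (objective: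
-- alternative algorithm, same return values).
-- math.ceil(length/numClasses) is ported exactly as -((-length) // numClasses); float rounding
-- cannot change the ceiling for the list lengths and |numClasses| ≤ 2^31 considered here.

-- ===== PORT A =====
def toCategorical (data : List Int) (numClasses : Int) : List Int :=
  let length : Int := data.length
  let bucketLength : Int := -(PySem.Int.floordiv (-length) numClasses)
  let indexData := PySem.List.sorted (PySem.List.enumerate data 0) (fun p => p.2)
  let st := (PySem.List.enumerate indexData 0).foldl
    (fun (st : List (Int × Int) × Int) ip =>
      (st.1 ++ [(st.2, ip.2.1)],
       if PySem.Int.mod (ip.1 + 1) bucketLength = 0 then st.2 + 1 else st.2))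
    ([], 0)
  let categoricalData := PySem.List.sorted st.1 (fun q => q.2)
  categoricalData.map (fun q => q.1)

-- ===== PORT B =====
-- classOfRank[rank]: rank is always a valid index (it is < len(data)), so the pyGet? below is
-- never none and the .getD 0 default is unreachable.
def toCategorical_alt (data : List Int) (numClasses : Int) : List Int :=
  if data.length = 0 then []
  else
    let bucketLength : Int := -(PySem.Int.floordiv (-(data.length : Int)) numClasses)
    let classOfRank := ((PySem.List.pyRange 0 (data.length : Int) 1).foldl
      (fun (st : List Int × Int) r =>
        (st.1 ++ [st.2], if PySem.Int.mod (r + 1) bucketLength = 0 then st.2 + 1 else st.2))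
      ([], 0)).1
    (PySem.List.enumerate data 0).foldl
      (fun (res : List Int) p =>
        let rank : Int := (PySem.List.enumerate data 0).foldl
          (fun (acc : Int) q => if q.2 < p.2 ∨ (q.2 = p.2 ∧ q.1 < p.1) then acc + 1 else acc) 0
        res ++ [(PySem.List.pyGet? classOfRank rank).getD 0]) []

-- ===== PRECONDITION & SPEC =====
-- Pre_ excludes exactly the inputs on which Python A raises ZeroDivisionError: numClasses = 0
-- (division), or bucketLength = 0 with a nonempty list (the '% bucketLength'), i.e. numClasses < 0
-- with data.length < -numClasses.
def Pre_toCategorical (data : List Int) (numClasses : Int) : Prop :=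
  numClasses ≠ 0 ∧ (data = [] ∨ 0 < numClasses ∨ -numClasses ≤ (data.length : Int))
instance (data : List Int) (numClasses : Int) : Decidable (Pre_toCategorical data numClasses) := by
  unfold Pre_toCategorical; infer_instance
def pvWitness_toCategorical : List Int × Int := ([3, 1, 2], 2)

def Spec_toCategorical (data : List Int) (numClasses : Int) (out : List Int) : Prop := out = toCategorical_alt data numClasses
instance (data : List Int) (numClasses : Int) (out : List Int) : Decidable (Spec_toCategorical data numClasses out) := by unfold Spec_toCategorical; infer_instance

-- ===== CLAIM (what is proved, stated in full; the proofs are below) =====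
def Claim_equal_toCategorical : Prop := ∀ (data : List Int) (numClasses : Int), Dom_toCategorical data numClasses → Pre_toCategorical data numClasses → Spec_toCategorical data numClasses (toCategorical data numClasses)

-- ===== LEMMAS AND PROOFS =====

-- the strict "stable-sort order" on (index, value) pairs: by value, ties by index
def pvLt (a b : Int × Int) : Prop := a.2 < b.2 ∨ (a.2 = b.2 ∧ a.1 < b.1)

-- A's first loop as a pair list; B's first loop as the class-per-rank list
def pvPairs (bL : Int) : List (Int × (Int × Int)) → Int → List (Int × Int)
  | [], _ => []
  | ip :: z, c => (c, ip.2.1) :: pvPairs bL z (if PySem.Int.mod (ip.1 + 1) bL = 0 then c + 1 else c)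

def pvCls (bL : Int) : List Int → Int → List Int
  | [], _ => []
  | r :: rs, c => c :: pvCls bL rs (if PySem.Int.mod (r + 1) bL = 0 then c + 1 else c)

-- B's element rank: number of pairs of the enumeration strictly pvLt-below p
def pvLtb (a b : Int × Int) : Bool := decide (a.2 < b.2 ∨ (a.2 = b.2 ∧ a.1 < b.1))

def pvRank (data : List Int) (p : Int × Int) : Int :=
  ((PySem.List.enumerate data 0).countP (fun q => pvLtb q p) : Int)

theorem foldA (bL : Int) (z : List (Int × (Int × Int))) : ∀ (acc : List (Int × Int)) (c : Int),
    (z.foldl (fun (st : List (Int × Int) × Int) ip =>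
      (st.1 ++ [(st.2, ip.2.1)],
       if PySem.Int.mod (ip.1 + 1) bL = 0 then st.2 + 1 else st.2)) (acc, c)).1
    = acc ++ pvPairs bL z c := by
  induction z with
  | nil => simp [pvPairs]
  | cons ip z ih => intro acc c; simp [pvPairs, List.foldl_cons, ih]

theorem foldB (bL : Int) (rs : List Int) : ∀ (acc : List Int) (c : Int),
    (rs.foldl (fun (st : List Int × Int) r =>
      (st.1 ++ [st.2], if PySem.Int.mod (r + 1) bL = 0 then st.2 + 1 else st.2)) (acc, c)).1
    = acc ++ pvCls bL rs c := by
  induction rs with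
  | nil => simp [pvCls]
  | cons r rs ih => intro acc c; simp [pvCls, List.foldl_cons, ih]

theorem map_fst_pvPairs (bL : Int) (z : List (Int × (Int × Int))) : ∀ c,
    (pvPairs bL z c).map (fun q => q.1) = pvCls bL (z.map (fun ip => ip.1)) c := by
  induction z with
  | nil => simp [pvPairs, pvCls]
  | cons ip z ih => intro c; simp [pvPairs, pvCls, ih]

theorem map_snd_pvPairs (bL : Int) (z : List (Int × (Int × Int))) : ∀ c,
    (pvPairs bL z c).map (fun q => q.2) = z.map (fun ip => ip.2.1) := by
  induction z with
  | nil => simp [pvPairs]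
  | cons ip z ih => intro c; simp [pvPairs, ih]

theorem length_pvPairs (bL : Int) (z : List (Int × (Int × Int))) : ∀ c,
    (pvPairs bL z c).length = z.length := by
  induction z with
  | nil => simp [pvPairs]
  | cons ip z ih => intro c; simp [pvPairs, ih]

theorem length_pvCls (bL : Int) (rs : List Int) : ∀ c, (pvCls bL rs c).length = rs.length := by
  induction rs with
  | nil => simp [pvCls]
  | cons r rs ih => intro c; simp [pvCls, ih]

theorem pvLtb_eq_true_iff (a b : Int × Int) : pvLtb a b = true ↔ pvLt a b := by
  simp [pvLtb, pvLt]

-- pvLt basic facts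
theorem pvLt_irrefl (a : Int × Int) : ¬ pvLt a a := by simp [pvLt]

theorem pvLt_asymm {a b : Int × Int} (h : pvLt a b) : ¬ pvLt b a := by
  unfold pvLt at *; omega

theorem pvLt_snd_le {a b : Int × Int} (h : pvLt a b) : a.2 ≤ b.2 := by
  unfold pvLt at h; omega

-- STABILITY: inserting a pair whose index is larger than every index already present keeps
-- the list pairwise pvLt
theorem insertBy_pairwise (x : Int × Int) : ∀ (ys : List (Int × Int)),
    ys.Pairwise pvLt → (∀ y ∈ ys, y.1 < x.1) →
    (PySem.List.insertBy (fun a b => decide (a.2 < b.2)) x ys).Pairwise pvLt := by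
  intro ys
  induction ys with
  | nil => intro _ _; simp [PySem.List.insertBy]
  | cons y ys ih =>
      intro hpw hfst
      rw [List.pairwise_cons] at hpw
      by_cases hlt : x.2 < y.2
      · have : PySem.List.insertBy (fun a b => decide (a.2 < b.2)) x (y :: ys)
            = x :: y :: ys := by simp [PySem.List.insertBy, hlt]
        rw [this, List.pairwise_cons]
        refine ⟨?_, List.pairwise_cons.mpr hpw⟩
        intro z hz
        rcases List.mem_cons.mp hz with rfl | hz
        · exact Or.inl hlt
        · exact Or.inl (lt_of_lt_of_le hlt (pvLt_snd_le (hpw.1 z hz)))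
      · have : PySem.List.insertBy (fun a b => decide (a.2 < b.2)) x (y :: ys)
            = y :: PySem.List.insertBy (fun a b => decide (a.2 < b.2)) x ys := by
          simp [PySem.List.insertBy, hlt]
        rw [this, List.pairwise_cons]
        constructor
        · intro z hz
          rcases (PySem.List.mem_insertBy _ _ _ _).mp hz with rfl | hz
          · unfold pvLt
            have := hfst y (List.mem_cons_self)
            omega
          · exact hpw.1 z hz
        · exact ih hpw.2 (fun y hy => hfst y (List.mem_cons_of_mem _ hy))

theorem foldl_insertBy_pairwise : ∀ (l acc : List (Int × Int)),
    acc.Pairwise pvLt → l.Pairwise (fun a b => a.1 < b.1) →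
    (∀ y ∈ acc, ∀ x ∈ l, y.1 < x.1) →
    (l.foldl (fun a x => PySem.List.insertBy (fun a b => decide (a.2 < b.2)) x a) acc).Pairwise pvLt := by
  intro l
  induction l with
  | nil => intro acc h _ _; simpa using h
  | cons x l ih =>
      intro acc hacc hl hcross
      rw [List.pairwise_cons] at hl
      simp only [List.foldl_cons]
      apply ih
      · exact insertBy_pairwise x acc hacc (fun y hy => hcross y hy x List.mem_cons_self)
      · exact hl.2
      · intro y hy x' hx'
        rcases (PySem.List.mem_insertBy _ _ _ _).mp hy with rfl | hy
        · exact hl.1 x' hx'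
        · exact hcross y hy x' (List.mem_cons_of_mem _ hx')

-- the stable sort of the enumeration is pairwise pvLt
theorem sorted_enumerate_pairwise (data : List Int) :
    (PySem.List.sorted (PySem.List.enumerate data 0) (fun p => p.2)).Pairwise pvLt := by
  rw [PySem.List.sorted_eq_foldl_insertBy]
  exact foldl_insertBy_pairwise _ [] (by simp) (PySem.List.pairwise_lt_enumerate data 0)
    (by simp)

-- in a pairwise-pvLt list, the number of elements pvLt-below the r-th element is r
theorem countP_pos (s : List (Int × Int)) (hpw : s.Pairwise pvLt) (r : Nat) (h : r < s.length) :
    s.countP (fun q => pvLtb q s[r]) = r := by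
  have hpg := List.pairwise_iff_getElem.mp hpw
  obtain ⟨x, hx⟩ : ∃ x, s[r] = x := ⟨_, rfl⟩
  rw [hx]
  have hdecomp : s = s.take r ++ x :: s.drop (r + 1) := by
    rw [← hx, ← List.drop_eq_getElem_cons h, List.take_append_drop]
  conv_lhs => rw [hdecomp]
  rw [List.countP_append, List.countP_cons]
  have h1 : (s.take r).countP (fun q => pvLtb q x) = (s.take r).length := by
    rw [List.countP_eq_length]
    intro a ha
    obtain ⟨i, hi, rfl⟩ := List.getElem_of_mem ha
    rw [List.getElem_take, pvLtb_eq_true_iff, ← hx]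
    exact hpg i r (by simp at hi; omega) h (by simp at hi; omega)
  have h2 : (s.drop (r + 1)).countP (fun q => pvLtb q x) = 0 := by
    rw [List.countP_eq_zero]
    intro a ha
    obtain ⟨i, hi, rfl⟩ := List.getElem_of_mem ha
    rw [List.getElem_drop, pvLtb_eq_true_iff, ← hx]
    exact pvLt_asymm (hpg r (r + 1 + i) h (by simp at hi; omega) (by omega))
  have h3 : pvLtb x x = false := by
    rw [← Bool.not_eq_true, pvLtb_eq_true_iff]
    exact pvLt_irrefl x
  rw [h1, h2, h3]
  simp [List.length_take, Nat.min_eq_left (le_of_lt h)]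

theorem ports_eq (data : List Int) (numClasses : Int) :
    toCategorical data numClasses = toCategorical_alt data numClasses := by
  by_cases hn : data.length = 0
  · have hd : data = [] := List.length_eq_zero_iff.mp hn
    subst hd; rfl
  · simp only [toCategorical, toCategorical_alt, if_neg hn]
    set n := data.length with hnn
    set bL : Int := -(PySem.Int.floordiv (-(n : Int)) numClasses) with hbL
    set e := PySem.List.enumerate data 0 with he
    set s := PySem.List.sorted e (fun p => p.2) with hs
    set z := PySem.List.enumerate s 0 with hz
    set rs := PySem.List.pyRange 0 (n : Int) 1 with hrs
    rw [foldA bL z [] 0, foldB bL rs [] 0]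
    simp only [List.nil_append]
    set cd := pvPairs bL z 0 with hcd
    set clsL := pvCls bL rs 0 with hclsL
    have hsperm : s.Perm e := PySem.List.sorted_perm _ _ _
    have hslen : s.length = n := by
      rw [hs, PySem.List.length_sorted, he, PySem.List.length_enumerate]
    have hpw : s.Pairwise pvLt := sorted_enumerate_pairwise data
    have hrslen : rs.length = n := by
      rw [hrs, PySem.List.pyRange_zero_natCast]; simp
    have hclslen : clsL.length = n := by rw [hclsL, length_pvCls, hrslen]
    have hzfst : z.map (fun ip => ip.1) = rs := by
      rw [hz, PySem.List.map_fst_enumerate, hslen, hrs]; norm_num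
    have hcdfst : cd.map (fun q => q.1) = clsL := by
      rw [hcd, map_fst_pvPairs, hzfst, hclsL]
    have hcdsnd : cd.map (fun q => q.2) = s.map (fun p => p.1) := by
      rw [hcd, map_snd_pvPairs]
      calc z.map (fun ip => ip.2.1)
          = (z.map (fun ip => ip.2)).map (fun p => p.1) := by
            simp [List.map_map, Function.comp]
        _ = s.map (fun p => p.1) := by rw [hz, PySem.List.map_snd_enumerate]
    have hcdlen : cd.length = n := by
      rw [hcd, length_pvPairs, hz, PySem.List.length_enumerate, hslen]
    set F : Int → Int :=
      fun k => (PySem.List.pyGet? clsL (pvRank data (k, PySem.List.pyGetD data k 0))).getD 0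
      with hF
    -- each element of s is (k, data[k])
    have hsr : ∀ (r : Nat) (h : r < s.length),
        s[r] = (s[r].1, PySem.List.pyGetD data s[r].1 0) := by
      intro r h
      have hmem : s[r] ∈ e := hsperm.mem_iff.mp (List.getElem_mem h)
      rw [he, PySem.List.mem_enumerate_iff] at hmem
      obtain ⟨k, hk, hEq⟩ := hmem
      rw [hEq]
      simp [PySem.List.pyGetD_natCast, hk]
    have hrank : ∀ (r : Nat) (h : r < s.length), pvRank data s[r] = (r : Int) := by
      intro r h
      rw [pvRank, ← he, ← hsperm.countP_eq, countP_pos s hpw r h]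
    have hFr : ∀ (r : Nat) (h : r < n), F (s[r]'(hslen ▸ h)).1 = clsL[r]'(hclslen ▸ h) := by
      intro r h
      have h' : r < s.length := hslen ▸ h
      rw [hF]
      simp only
      rw [← hsr r h', hrank r h', PySem.List.pyGet?_natCast,
        List.getElem?_eq_getElem (hclslen ▸ h)]
      rfl
    have hcd_eq : cd = (s.map (fun p => p.1)).map (fun k => (F k, k)) := by
      apply List.ext_getElem
      · simp [hcdlen, hslen]
      · intro r h1 h2
        have hr : r < n := by rwa [hcdlen] at h1
        have h' : r < s.length := hslen ▸ hr
        have e1 : cd[r].1 = clsL[r]'(hclslen ▸ hr) := by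
          have := List.getElem_of_eq hcdfst (by simpa [hcdlen] using hr)
          rw [List.getElem_map] at this
          exact this
        have e2 : cd[r].2 = (s[r]'h').1 := by
          have := List.getElem_of_eq hcdsnd (by simpa [hcdlen] using hr)
          rw [List.getElem_map, List.getElem_map] at this
          exact this
        have e3 : ((s.map (fun p => p.1)).map (fun k => (F k, k)))[r] =
            (F ((s[r]'h').1), (s[r]'h').1) := by
          simp
        rw [e3, Prod.ext_iff]
        exact ⟨by rw [e1, ← hFr r hr], e2⟩
    have hsfstperm : (s.map (fun p => p.1)).Perm rs := by
      have hp := hsperm.map (fun p => p.1)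
      rw [he, PySem.List.map_fst_enumerate] at hp
      rw [hrs]
      simpa using hp
    have hys_perm : (rs.map (fun k => (F k, k))).Perm cd := by
      rw [hcd_eq]; exact (hsfstperm.map _).symm
    have hys_pw : (rs.map (fun k => (F k, k))).Pairwise
        (fun a b => (fun q : Int × Int => q.2) a < (fun q : Int × Int => q.2) b) := by
      apply List.pairwise_map.mpr
      exact PySem.List.pairwise_lt_pyRange_one 0 (n : Int)
    have hsorted : PySem.List.sorted cd (fun q => q.2) = rs.map (fun k => (F k, k)) :=
      PySem.List.sorted_eq_of_perm_of_pairwise_lt cd (rs.map (fun k => (F k, k)))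
        (fun q => q.2) hys_perm hys_pw
    rw [hsorted, List.map_map]
    -- B side: the rank fold is a countP, and each element of e is (k, data[k])
    rw [PySem.List.foldl_append_singleton_eq_map
      (fun p : Int × Int => (PySem.List.pyGet? clsL
        ((e.foldl (fun (acc : Int) q =>
          if q.2 < p.2 ∨ (q.2 = p.2 ∧ q.1 < p.1) then acc + 1 else acc) 0))).getD 0) e []]
    simp only [List.nil_append]
    have hbelem : ∀ p ∈ e, (PySem.List.pyGet? clsL
        ((e.foldl (fun (acc : Int) q =>
          if q.2 < p.2 ∨ (q.2 = p.2 ∧ q.1 < p.1) then acc + 1 else acc) 0))).getD 0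
        = F p.1 := by
      intro p hp
      have hcount := PySem.List.foldl_ite_add_one
        (fun q : Int × Int => q.2 < p.2 ∨ (q.2 = p.2 ∧ q.1 < p.1)) e 0
      rw [hcount]
      have hpform : p = (p.1, PySem.List.pyGetD data p.1 0) := by
        rw [he, PySem.List.mem_enumerate_iff] at hp
        obtain ⟨k, hk, hEq⟩ := hp
        rw [hEq]
        simp [PySem.List.pyGetD_natCast, hk]
      have hrankform : (0 : Int) + ((e.countP
          (fun q => decide (q.2 < p.2 ∨ (q.2 = p.2 ∧ q.1 < p.1)))) : Int)
          = pvRank data p := by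
        rw [pvRank, ← he, zero_add]
        rfl
      rw [hrankform, hF]
      simp only
      rw [← hpform]
    rw [List.map_congr_left hbelem]
    have hefst : e.map (fun p : Int × Int => p.1) = rs := by
      rw [he, PySem.List.map_fst_enumerate, hrs]; norm_num; rw [hnn]
    rw [← hefst, List.map_map]
    simp [Function.comp]

-- ===== VERDICT (by name: the statement is the Claim_ definition above) =====
theorem toCategorical_spec : Claim_equal_toCategorical := by
  intro data numClasses _ _
  unfold Spec_toCategorical
  exact ports_eq data numClasses
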